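-- pv_equiv track=rewrite | github.com/davidjonas/AnyMail | anymail/db.py | sanitize_argv
-- ===== SOURCE A (Python) =====
-- from typing import Any, Dict, Iterator, List, Optional
--
-- def sanitize_argv(argv: List[str]) -> List[str]:
--     """Redact sensitive values in argv (e.g. --body content, attachment paths)."""
--     out: List[str] = []
--     i = 0
--     sensitive_flags = frozenset({"--body", "--attach"})
--     while i < len(argv):
--         arg = argv[i]
--         out.append(arg)
--         if arg in sensitive_flags and i + 1 < len(argv):
--             out.append("[REDACTED]")
--             i += 1
--         i += 1
--     return out
-- ===== SOURCE B (Python) =====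
-- def sanitize_argv(argv):
--     """Redact sensitive values in argv (e.g. --body content, attachment paths)."""
--     sensitive_flags = frozenset({"--body", "--attach"})
--     # Element j is redacted iff the run of consecutive sensitive-flag strings
--     # immediately before position j has odd length (parity replaces skip-state).
--     run = 0
--     out = []
--     for a in argv:
--         out.append("[REDACTED]" if run % 2 == 1 else a)
--         run = run + 1 if a in sensitive_flags else 0
--     return out
-- ===== Notes on version B (the rewrite author's own statement) =====
-- stated objective: alternative
-- what changed: Replaced the while loop that consumes two elements per flag (i+1 lookahead and skip) by a one-output-per-input scan using a flag-run-length counter: a position is redacted iff the run of consecutive sensitive-flag strings immediately before it has odd length.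
import Mathlib
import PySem

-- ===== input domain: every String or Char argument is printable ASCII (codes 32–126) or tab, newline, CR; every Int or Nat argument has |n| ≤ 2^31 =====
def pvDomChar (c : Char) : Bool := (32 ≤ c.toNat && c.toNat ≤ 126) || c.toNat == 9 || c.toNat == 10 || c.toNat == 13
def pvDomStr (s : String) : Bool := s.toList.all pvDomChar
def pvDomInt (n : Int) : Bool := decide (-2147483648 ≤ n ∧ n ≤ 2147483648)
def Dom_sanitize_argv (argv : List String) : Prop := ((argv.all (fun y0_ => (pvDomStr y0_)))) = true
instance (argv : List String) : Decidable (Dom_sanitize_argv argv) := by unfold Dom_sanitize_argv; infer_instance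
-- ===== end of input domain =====

-- B replaces A's consume-and-skip while loop by the parity characterization:
-- element j is redacted iff the run of consecutive sensitive-flag strings
-- immediately before position j has odd length (objective: alternative).


-- ===== PORT A =====
-- A's while loop over index i: arg is appended; if it is a sensitive flag and a
-- next element exists, "[REDACTED]" is appended and that next element skipped.
-- Ported as recursion on the remaining suffix (arg = head, 'i + 1 < len' = tail ≠ []).
def sanitizeA_go : List String → List String
  | [] => []
  | arg :: rest' =>
    if arg = "--body" ∨ arg = "--attach" then
      match rest' with
      | _ :: rest'' => arg :: "[REDACTED]" :: sanitizeA_go rest''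
      | [] => arg :: sanitizeA_go []
    else
      arg :: sanitizeA_go rest'

def sanitize_argv (argv : List String) : List String := sanitizeA_go argv

-- ===== PORT B =====
-- B's for-loop carrying `run`, the length of the current run of flag strings;
-- the current element is replaced by "[REDACTED]" exactly when run is odd.
def sanitizeB_go (run : Nat) : List String → List String
  | [] => []
  | a :: rest =>
    (if run % 2 = 1 then "[REDACTED]" else a) ::
      sanitizeB_go (if a = "--body" ∨ a = "--attach" then run + 1 else 0) rest

def sanitize_argv_alt (argv : List String) : List String := sanitizeB_go 0 argv

-- ===== PRECONDITION & SPEC =====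
def Spec_sanitize_argv (argv : List String) (out : List String) : Prop := out = sanitize_argv_alt argv
instance (argv : List String) (out : List String) : Decidable (Spec_sanitize_argv argv out) := by unfold Spec_sanitize_argv; infer_instance

-- ===== CLAIM (what is proved, stated in full; the proofs are below) =====
def Claim_equal_sanitize_argv : Prop := ∀ (argv : List String), Dom_sanitize_argv argv → Spec_sanitize_argv argv (sanitize_argv argv)

-- ===== LEMMAS AND PROOFS =====
-- B's output depends on the carried run length only through its parity.
theorem sanitizeB_parity (l : List String) (r r' : Nat) (h : r % 2 = r' % 2) :
    sanitizeB_go r l = sanitizeB_go r' l := by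
  induction l generalizing r r' with
  | nil => rfl
  | cons a rest ih =>
    simp only [sanitizeB_go, h]
    refine congrArg _ ?_
    split
    · exact ih (r + 1) (r' + 1) (by omega)
    · rfl

theorem sanitizeA_eq_B (l : List String) : sanitizeA_go l = sanitizeB_go 0 l := by
  induction l using sanitizeA_go.induct with
  | case1 => rfl
  | case2 arg hflag next rest'' ih =>
    simp only [sanitizeA_go, if_pos hflag, sanitizeB_go]
    norm_num
    rw [ih]
    split
    · exact sanitizeB_parity _ 0 2 rfl
    · rfl
  | case3 arg hflag ih =>
    simp [sanitizeA_go, sanitizeB_go]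
  | case4 arg rest' hflag ih =>
    rw [sanitizeA_go.eq_def]
    simp only [if_neg hflag, sanitizeB_go, ih]
    norm_num

-- ===== VERDICT (by name: the statement is the Claim_ definition above) =====
theorem sanitize_argv_spec : Claim_equal_sanitize_argv := by
  intro argv _
  unfold Spec_sanitize_argv sanitize_argv sanitize_argv_alt
  exact sanitizeA_eq_B argv
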